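-- pv_equiv track=rewrite | github.com/kpomer/Advent-Of-Code | 2025/Days/day_06/day_06.py | part1
-- ===== SOURCE A (Python) =====
-- import math
--
-- def part1(fileSA):
--
--     mathProblems = [] # [num1, num2, ..., numN, symbol]
--     problemElements = len(fileSA) - 1
--
--     row = 0
--     while row <= problemElements:
--         rowVal = fileSA[row].replace("\n","").split()
--         col = 0
--         while col < len(rowVal):
--             if row == 0:
--                 mathProblems.append([0] * (problemElements+1))
--             val = rowVal[col]
--             if val.isnumeric():
--                 mathProblems[col][row] = int(val)
--             else:
--                 mathProblems[col][row] = val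
--             col += 1
--         row += 1
--
--     part1_sum = 0
--     for problem in mathProblems:
--         if problem[problemElements] == "+":
--             problem.pop(problemElements)
--             part1_sum += sum(problem)
--         elif problem[problemElements] == "*":
--             problem.pop(problemElements)
--             part1_sum += math.prod(problem)
--
--     return part1_sum
-- ===== SOURCE B (Python) =====
-- import math
--
-- def part1(fileSA):
--     rows = [line.replace("\n", "").split() for line in fileSA]
--     if not rows:
--         return 0
--     total = 0
--     last = rows[-1]
--     for col in range(len(rows[0])):
--         op = last[col] if col < len(last) else None
--         if op != "+" and op != "*":
--             continue
--         nums = [int(r[col]) if col < len(r) and r[col].isnumeric() else 0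
--                 for r in rows[:-1]]
--         total += sum(nums) if op == "+" else math.prod(nums)
--     return total
-- ===== Notes on version B (the rewrite author's own statement) =====
-- stated objective: simpler
-- what changed: Replaces A's index-driven while-loops that fill a mutable column matrix in place (plus a second pass over that matrix with pop) by one direct pass over the column indices of the split rows, aggregating each '+'/'*' column immediately.
import Mathlib
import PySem

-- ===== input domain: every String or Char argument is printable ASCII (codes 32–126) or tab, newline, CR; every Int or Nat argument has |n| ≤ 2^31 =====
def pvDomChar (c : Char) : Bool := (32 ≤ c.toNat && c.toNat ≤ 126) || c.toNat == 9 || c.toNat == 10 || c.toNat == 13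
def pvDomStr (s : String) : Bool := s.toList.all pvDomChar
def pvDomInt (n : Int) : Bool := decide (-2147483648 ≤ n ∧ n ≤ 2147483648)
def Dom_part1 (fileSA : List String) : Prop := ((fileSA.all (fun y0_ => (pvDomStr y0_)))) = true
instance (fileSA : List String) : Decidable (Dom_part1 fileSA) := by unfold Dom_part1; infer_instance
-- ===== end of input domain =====

-- B replaces A's index-driven while-loops that fill a mutable column matrix (plus a second pass over it)
-- with one direct pass over the columns of the split rows (objective: simpler).

-- ===== PORT A =====
-- a matrix cell holds int(val) for a numeric token, the raw string otherwise (Python isnumeric = isdigit on ASCII)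
inductive PCell where
  | i : Int → PCell
  | s : String → PCell
deriving DecidableEq, Repr

def pvCellOf (val : String) : PCell :=
  if PySem.Str.strIsdigit val then PCell.i ((PySem.Int.ofStr? val).getD 0) else PCell.s val

-- the inner 'while col < len(rowVal)' loop; on row 0 a fresh zero column is appended per token;
-- the IndexError of 'mathProblems[col][row] = …' is excluded by Pre_ (pySetD/pyGetD are the total forms)
def pvColLoopA (row : Nat) (n : Nat) : List String → Nat → List (List PCell) → List (List PCell)
  | [], _, mp => mp
  | val :: rest, col, mp =>
      let mp1 := if row = 0 then mp ++ [List.replicate n (PCell.i 0)] else mp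
      let mp2 := PySem.List.pySetD mp1 (col : Int)
                  (PySem.List.pySetD (PySem.List.pyGetD mp1 (col : Int) []) (row : Int) (pvCellOf val))
      pvColLoopA row n rest (col + 1) mp2

-- the outer 'while row <= problemElements' loop (iterating the lines with their index)
def pvRowLoopA (n : Nat) : List String → Nat → List (List PCell) → List (List PCell)
  | [], _, mp => mp
  | line :: rest, row, mp =>
      pvRowLoopA n rest (row + 1)
        (pvColLoopA row n (PySem.Str.split₀ (PySem.Str.replace line "\n" "")) 0 mp)

-- sum(problem) / math.prod(problem); on a string cell Python raises TypeError — excluded by Pre_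
def pvSumCells (l : List PCell) : Int :=
  l.foldl (fun acc c => match c with | .i m => acc + m | .s _ => acc) 0
def pvProdCells (l : List PCell) : Int :=
  l.foldl (fun acc c => match c with | .i m => acc * m | .s _ => acc) 1

def part1 (fileSA : List String) : Int :=
  let pe : Int := (fileSA.length : Int) - 1
  let mp := pvRowLoopA fileSA.length fileSA 0 []
  mp.foldl (fun acc problem =>
    if PySem.List.pyGetD problem pe (PCell.i 0) = PCell.s "+" then
      acc + pvSumCells (((PySem.List.pop? problem pe).map Prod.snd).getD [])
    else if PySem.List.pyGetD problem pe (PCell.i 0) = PCell.s "*" then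
      acc + pvProdCells (((PySem.List.pop? problem pe).map Prod.snd).getD [])
    else acc) 0

-- ===== PORT B =====
def pvRowsB (fileSA : List String) : List (List String) :=
  fileSA.map (fun line => PySem.Str.split₀ (PySem.Str.replace line "\n" ""))

-- int(r[col]) if the token exists and is numeric, else 0
def pvNumAt (r : List String) (col : Nat) : Int :=
  if col < r.length ∧ PySem.Str.strIsdigit (r.getD col "") then (PySem.Int.ofStr? (r.getD col "")).getD 0 else 0

def part1_alt (fileSA : List String) : Int :=
  let rows := pvRowsB fileSA
  if rows.isEmpty then 0 else
  let last := rows.getLastD []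
  (List.range (rows.headD []).length).foldl (fun total col =>
    let op? : Option String := if col < last.length then some (last.getD col "") else none
    if op? ≠ some "+" ∧ op? ≠ some "*" then total
    else
      let nums := (rows.dropLast).map (fun r => pvNumAt r col)
      total + (if op? = some "+" then nums.sum else nums.prod)) 0

-- ===== PRECONDITION & SPEC =====
-- Pre_ excludes exactly the inputs on which A raises: a row with more tokens than row 0 (IndexError on
-- mathProblems[col]), and a non-numeric token above a '+'/'*' operator (TypeError in sum/math.prod).
def Pre_part1 (fileSA : List String) : Prop :=
  (∀ r ∈ pvRowsB fileSA, r.length ≤ ((pvRowsB fileSA).headD []).length) ∧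
  (∀ col : Nat, col < ((pvRowsB fileSA).headD []).length →
     (((pvRowsB fileSA).getLastD []).getD col "" = "+" ∨ ((pvRowsB fileSA).getLastD []).getD col "" = "*") →
     ∀ r ∈ (pvRowsB fileSA).dropLast, col < r.length → PySem.Str.strIsdigit (r.getD col "") = true)
instance (fileSA : List String) : Decidable (Pre_part1 fileSA) := by unfold Pre_part1; infer_instance

def pvWitness_part1 : List String := ["1 2\n", "3 4\n", "+ *"]

def Spec_part1 (fileSA : List String) (out : Int) : Prop := out = part1_alt fileSA
instance (fileSA : List String) (out : Int) : Decidable (Spec_part1 fileSA out) := by unfold Spec_part1; infer_instance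

-- ===== CLAIM (what is proved, stated in full; the proofs are below) =====
def Claim_equal_part1 : Prop := ∀ (fileSA : List String), Dom_part1 fileSA → Pre_part1 fileSA → Spec_part1 fileSA (part1 fileSA)

-- ===== LEMMAS AND PROOFS =====
lemma pvColLoopA_zero (n : Nat) :
    ∀ (toks : List String) (mp : List (List PCell)),
    pvColLoopA 0 n toks mp.length mp
      = mp ++ toks.map (fun v => (List.replicate n (PCell.i 0)).set 0 (pvCellOf v)) := by
  intro toks
  induction toks with
  | nil => intro mp; simp [pvColLoopA]
  | cons v rest ih =>
    intro mp
    simp only [pvColLoopA, if_true, Nat.cast_zero]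
    have hget : PySem.List.pyGetD (mp ++ [List.replicate n (PCell.i 0)]) ((mp.length : Nat) : Int) []
        = List.replicate n (PCell.i 0) := by
      simp [List.getD_eq_getElem?_getD]
    rw [hget]
    have hset : PySem.List.pySetD (mp ++ [List.replicate n (PCell.i 0)]) ((mp.length : Nat) : Int)
        (PySem.List.pySetD (List.replicate n (PCell.i 0)) ((0:Int)) (pvCellOf v))
        = mp ++ [(List.replicate n (PCell.i 0)).set 0 (pvCellOf v)] := by
      have h0 : PySem.List.pySetD (List.replicate n (PCell.i 0)) ((0:Int)) (pvCellOf v)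
          = (List.replicate n (PCell.i 0)).set 0 (pvCellOf v) := by
        have := PySem.List.pySetD_natCast (xs := List.replicate n (PCell.i 0)) (n := 0) (v := pvCellOf v)
        simpa using this
      rw [h0]
      have : PySem.List.pySetD (mp ++ [List.replicate n (PCell.i 0)]) ((mp.length : Nat) : Int)
          ((List.replicate n (PCell.i 0)).set 0 (pvCellOf v))
          = (mp ++ [List.replicate n (PCell.i 0)]).set mp.length ((List.replicate n (PCell.i 0)).set 0 (pvCellOf v)) := by
        simp
      rw [this, List.set_append_right _ _ (le_refl _)]
      simp
    rw [hset]
    have hlen : mp.length + 1 = (mp ++ [(List.replicate n (PCell.i 0)).set 0 (pvCellOf v)]).length := by simp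
    rw [hlen, ih]
    simp
lemma pv_set_map_range {α : Type} (w k : Nat) (f : Nat → α) (x : α) :
    ((List.range w).map f).set k x = (List.range w).map (fun c => if c = k then x else f c) := by
  apply List.ext_getElem
  · simp
  · intro i h1 h2
    simp only [List.getElem_set, List.getElem_map, List.getElem_range]
    split_ifs with h3 h4 h4 <;> first | rfl | omega

lemma pvColLoopA_pos (r n w : Nat) (hr : r ≠ 0) :
    ∀ (toks : List String) (col : Nat) (f : Nat → List PCell), col + toks.length ≤ w →
    pvColLoopA r n toks col ((List.range w).map f)
      = (List.range w).map (fun c => if col ≤ c ∧ c < col + toks.length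
          then (f c).set r (pvCellOf (toks.getD (c - col) "")) else f c) := by
  intro toks
  induction toks with
  | nil =>
    intro col f h
    simp only [pvColLoopA]
    apply List.map_congr_left
    intro c hc
    simp only [List.mem_range] at hc
    have hno : ¬ (col ≤ c ∧ c < col + ([] : List String).length) := by simp
    rw [if_neg hno]
  | cons v rest ih =>
    intro col f h
    simp only [pvColLoopA, if_neg hr]
    have hcw : col < w := by simp at h; omega
    have hget : PySem.List.pyGetD ((List.range w).map f) ((col : Nat) : Int) [] = f col := by
      simp [List.getD_eq_getElem?_getD, List.getElem?_eq_getElem (by simpa using hcw : col < ((List.range w).map f).length)]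
    rw [hget]
    have hset : PySem.List.pySetD ((List.range w).map f) ((col : Nat) : Int)
        (PySem.List.pySetD (f col) ((r : Nat) : Int) (pvCellOf v))
        = (List.range w).map (fun c => if c = col then (f col).set r (pvCellOf v) else f c) := by
      simp only [PySem.List.pySetD_natCast]
      rw [pv_set_map_range]
    rw [hset, ih (col + 1) _ (by simp at h ⊢; omega)]
    apply List.map_congr_left
    intro c hc
    simp only [List.mem_range] at hc
    by_cases h1 : c = col
    · subst h1
      simp [show c ≤ c ∧ c < c + (rest.length + 1) from by omega]
    · by_cases h2 : col + 1 ≤ c ∧ c < col + 1 + rest.length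
      · have h3 : col ≤ c ∧ c < col + (rest.length + 1) := by omega
        simp only [if_pos h2, if_neg h1]
        have heq : rest.getD (c - (col + 1)) "" = (v :: rest).getD (c - col) "" := by
          have hcc : c - col = (c - (col+1)) + 1 := by omega
          rw [hcc]; rfl
        rw [heq]
        have h4 : col ≤ c ∧ c < col + (v :: rest).length := by simp; omega
        rw [if_pos h4]
      · have h3 : ¬ (col ≤ c ∧ c < col + (rest.length + 1)) := by omega
        simp only [if_neg h2, if_neg h1]
        have h4 : ¬ (col ≤ c ∧ c < col + (v :: rest).length) := by simp; omega
        rw [if_neg h4]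
def pvCellAt (rows : List (List String)) (c i : Nat) : PCell :=
  if c < (rows.getD i []).length then pvCellOf ((rows.getD i []).getD c "") else PCell.i 0

def pvMpart (rows : List (List String)) (n w r : Nat) : List (List PCell) :=
  (List.range w).map (fun c => (List.range n).map (fun i => if i < r then pvCellAt rows c i else PCell.i 0))

lemma pvRowLoopA_inv (fileSA : List String) (w : Nat)
    (hlen : ∀ q ∈ pvRowsB fileSA, q.length ≤ w) :
    ∀ (rest : List String) (r : Nat), 1 ≤ r → rest = fileSA.drop r →
    pvRowLoopA fileSA.length rest r (pvMpart (pvRowsB fileSA) fileSA.length w r)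
      = pvMpart (pvRowsB fileSA) fileSA.length w fileSA.length := by
  intro rest
  induction rest with
  | nil =>
    intro r hr hdrop
    have hge : fileSA.length ≤ r := by
      by_contra hlt
      have : fileSA.drop r ≠ [] := by
        apply List.ne_nil_of_length_pos
        simp; omega
      exact this hdrop.symm
    simp only [pvRowLoopA, pvMpart]
    apply List.map_congr_left
    intro c _
    apply List.map_congr_left
    intro i hi
    simp only [List.mem_range] at hi
    have h1 : i < r := by omega
    have h2 : i < fileSA.length := hi
    simp [h1, h2]
  | cons line rest' ih =>
    intro r hr hdrop
    have hrlt : r < fileSA.length := by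
      by_contra hge
      have : fileSA.drop r = [] := List.drop_eq_nil_of_le (by omega)
      rw [this] at hdrop; simp at hdrop
    have hn : fileSA.length = (pvRowsB fileSA).length := by simp [pvRowsB]
    have htoks : PySem.Str.split₀ (PySem.Str.replace line "\n" "") = (pvRowsB fileSA).getD r [] := by
      have : (pvRowsB fileSA).drop r = pvRowsB (line :: rest') := by
        simp only [pvRowsB, ← List.map_drop, ← hdrop]
      have h0 : ((pvRowsB fileSA).drop r).getD 0 [] = (pvRowsB fileSA).getD r [] := by
        simp [List.getD_eq_getElem?_getD, List.getElem?_drop]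
      rw [this] at h0
      simpa [pvRowsB] using h0
    have hmem : (pvRowsB fileSA).getD r [] ∈ pvRowsB fileSA := by
      have hr2 : r < (pvRowsB fileSA).length := by omega
      simp [List.getD_eq_getElem?_getD, List.getElem?_eq_getElem hr2]
    have hwid : ((pvRowsB fileSA).getD r []).length ≤ w := hlen _ hmem
    simp only [pvRowLoopA, pvMpart, htoks]
    rw [pvColLoopA_pos _ _ _ (by omega) _ 0 _ (by omega)]
    have hstep : (List.map
        (fun c => if 0 ≤ c ∧ c < 0 + ((pvRowsB fileSA).getD r []).length
          then ((fun c => (List.range fileSA.length).map (fun i => if i < r then pvCellAt (pvRowsB fileSA) c i else PCell.i 0)) c).set r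
                 (pvCellOf (((pvRowsB fileSA).getD r []).getD (c - 0) ""))
          else (fun c => (List.range fileSA.length).map (fun i => if i < r then pvCellAt (pvRowsB fileSA) c i else PCell.i 0)) c)
        (List.range w))
      = pvMpart (pvRowsB fileSA) fileSA.length w (r + 1) := by
      unfold pvMpart
      apply List.map_congr_left
      intro c _
      by_cases hc : c < ((pvRowsB fileSA).getD r []).length
      · rw [if_pos (by omega)]
        simp only []
        rw [pv_set_map_range]
        apply List.map_congr_left
        intro i hi
        simp only [List.mem_range] at hi
        by_cases h1 : i = r
        · subst h1
          rw [if_pos rfl, if_pos (by omega)]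
          simp only [Nat.sub_zero, pvCellAt, if_pos hc]
        · by_cases h2 : i < r
          · simp [h1, h2, show i < r + 1 from by omega]
          · simp [h1, h2, show ¬ i < r + 1 from by omega]
      · rw [if_neg (by omega)]
        apply List.map_congr_left
        intro i hi
        simp only [List.mem_range] at hi
        by_cases h2 : i < r
        · simp [h2, show i < r + 1 from by omega]
        · by_cases h1 : i = r
          · subst h1
            rw [if_neg h2, if_pos (by omega)]
            unfold pvCellAt
            rw [if_neg hc]
          · simp [h2, show ¬ i < r + 1 from by omega]
    rw [hstep]
    have hdrop' : rest' = fileSA.drop (r + 1) := by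
      have h := congrArg List.tail hdrop
      simpa [List.tail_drop] using h
    exact ih (r + 1) (by omega) hdrop'
lemma pv_map_eq_map_range {α β : Type} (l : List α) (g : α → β) (d : α) :
    l.map g = (List.range l.length).map (fun i => g (l.getD i d)) := by
  apply List.ext_getElem
  · simp
  · intro i h1 h2
    have hi : i < l.length := by simpa using h1
    simp [List.getD_eq_getElem?_getD, List.getElem?_eq_getElem hi]

lemma pv_set_replicate_zero (n : Nat) (x y : PCell) :
    (List.replicate n x).set 0 y = (List.range n).map (fun i => if i < 1 then y else x) := by
  apply List.ext_getElem
  · simp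
  · intro i h1 h2
    simp only [List.getElem_set, List.getElem_replicate, List.getElem_map, List.getElem_range]
    split_ifs <;> first | rfl | omega

lemma pv_cellAt_eq_s_iff (rows : List (List String)) (c i : Nat) (op : String)
    (hop : PySem.Str.strIsdigit op = false) :
    pvCellAt rows c i = PCell.s op ↔ (c < (rows.getD i []).length ∧ (rows.getD i []).getD c "" = op) := by
  unfold pvCellAt pvCellOf
  constructor
  · intro h
    split_ifs at h with h1 h2
    all_goals try cases h
    all_goals simp_all
  · rintro ⟨h1, h2⟩
    rw [if_pos h1, h2, if_neg (by simpa using hop)]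

lemma pv_pop_snd (l : List PCell) (m : Nat) (h : l.length = m + 1) :
    ((PySem.List.pop? l ((m : Nat) : Int)).map Prod.snd).getD [] = l.dropLast := by
  have hlt : (m:Int).toNat < l.length := by simp; omega
  simp only [PySem.List.pop?, PySem.List.pyIdx?, h]
  rw [if_pos (by omega : (0:Int) ≤ (m:Int)), if_pos (by push_cast; omega : (m:Int) < ((m+1 : Nat) : Int))]
  rw [show ((some ((m:Int).toNat)).bind (fun a => Option.map (fun x => (x, l.eraseIdx a)) l[a]?))
      = Option.map (fun x => (x, l.eraseIdx (m:Int).toNat)) l[(m:Int).toNat]? from rfl]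
  rw [List.getElem?_eq_getElem hlt]
  simp only [Option.map_some, Option.getD_some]
  rw [← List.dropLast_eq_eraseIdx (by simp; omega)]
lemma pv_getD_last {α : Type} (l : List α) (d : α) : l.getD (l.length - 1) d = l.getLastD d := by
  rw [List.getLastD_eq_getLast?, List.getLast?_eq_getElem?]
  simp [List.getD_eq_getElem?_getD]
lemma pv_getD_dropLast {α : Type} (l : List α) (d : α) (i : Nat) (h : i < l.length - 1) :
    l.dropLast.getD i d = l.getD i d := by
  have h1 : i < l.dropLast.length := by simp; omega
  have h2 : i < l.length := by omega
  rw [List.getD_eq_getElem?_getD, List.getElem?_eq_getElem h1, List.getD_eq_getElem?_getD, List.getElem?_eq_getElem h2]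
  simp [List.getElem_dropLast]
lemma pv_dropLast_map_range {α : Type} (n : Nat) (f : Nat → α) :
    ((List.range n).map f).dropLast = (List.range (n-1)).map f := by
  cases n with
  | zero => simp
  | succ m => rw [List.range_succ, List.map_append]; simp
lemma part1_cons (l0 : String) (restL : List String) :
    part1 (l0 :: restL) = (pvRowLoopA (l0 :: restL).length (l0 :: restL) 0 []).foldl
      (fun acc problem =>
        if PySem.List.pyGetD problem (((l0 :: restL).length : Int) - 1) (PCell.i 0) = PCell.s "+" then
          acc + pvSumCells (((PySem.List.pop? problem (((l0 :: restL).length : Int) - 1)).map Prod.snd).getD [])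
        else if PySem.List.pyGetD problem (((l0 :: restL).length : Int) - 1) (PCell.i 0) = PCell.s "*" then
          acc + pvProdCells (((PySem.List.pop? problem (((l0 :: restL).length : Int) - 1)).map Prod.snd).getD [])
        else acc) 0 := rfl
lemma part1_alt_cons (l0 : String) (restL : List String) :
    part1_alt (l0 :: restL) = (List.range ((pvRowsB (l0 :: restL)).headD []).length).foldl
      (fun total col =>
        let op? : Option String := if col < ((pvRowsB (l0 :: restL)).getLastD []).length
            then some (((pvRowsB (l0 :: restL)).getLastD []).getD col "") else none
        if op? ≠ some "+" ∧ op? ≠ some "*" then total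
        else
          let nums := ((pvRowsB (l0 :: restL)).dropLast).map (fun r => pvNumAt r col)
          total + (if op? = some "+" then nums.sum else nums.prod)) 0 := by
    simp only [part1_alt, pvRowsB, List.map_cons, List.isEmpty_cons, Bool.false_eq_true, if_false]
lemma pv_sum_aux (l : List Int) : ∀ a : Int, (l.map PCell.i).foldl (fun acc c => match c with | .i m => acc + m | .s _ => acc) a = a + l.sum := by
  induction l with
  | nil => simp
  | cons x t ih => intro a; simp [List.foldl_cons, ih]; ring
lemma pvSumCells_map_i (l : List Int) : pvSumCells (l.map PCell.i) = l.sum := by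
  simpa [pvSumCells] using pv_sum_aux l 0
lemma pv_prod_aux (l : List Int) : ∀ a : Int, (l.map PCell.i).foldl (fun acc c => match c with | .i m => acc * m | .s _ => acc) a = a * l.prod := by
  induction l with
  | nil => simp
  | cons x t ih => intro a; simp [List.foldl_cons, ih]; ring
lemma pvProdCells_map_i (l : List Int) : pvProdCells (l.map PCell.i) = l.prod := by
  simpa [pvProdCells] using pv_prod_aux l 1
theorem part1_eq (fileSA : List String) (hpre : Pre_part1 fileSA) : part1 fileSA = part1_alt fileSA := by
  obtain ⟨hlen, hdig⟩ := hpre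
  cases fileSA with
  | nil => rfl
  | cons l0 restL =>
    have hne : pvRowsB (l0 :: restL) ≠ [] := by simp [pvRowsB]
    have hnlen : (l0 :: restL).length = (pvRowsB (l0 :: restL)).length := by simp [pvRowsB]
    have hn1 : 1 ≤ (l0 :: restL).length := by simp
    set rows := pvRowsB (l0 :: restL) with hrows
    set n := (l0 :: restL).length with hn
    set w := (rows.headD []).length with hw
    have htoks0 : rows.getD 0 [] = PySem.Str.split₀ (PySem.Str.replace l0 "\n" "") := by
      simp [hrows, pvRowsB]
    have hw0 : w = (rows.getD 0 []).length := by
      rw [hw, hrows]; simp [pvRowsB]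
    have hmp : pvRowLoopA n (l0 :: restL) 0 [] = pvMpart rows n w n := by
      have step0 : pvColLoopA 0 n (PySem.Str.split₀ (PySem.Str.replace l0 "\n" "")) 0 []
          = pvMpart rows n w 1 := by
        have h1 := pvColLoopA_zero n (PySem.Str.split₀ (PySem.Str.replace l0 "\n" "")) []
        simp only [List.length_nil, List.nil_append] at h1
        rw [h1, ← htoks0]
        rw [pv_map_eq_map_range (rows.getD 0 []) _ ""]
        unfold pvMpart
        rw [← hw0]
        apply List.map_congr_left
        intro c hc
        simp only [List.mem_range] at hc
        rw [pv_set_replicate_zero]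
        apply List.map_congr_left
        intro i hi
        simp only [List.mem_range] at hi
        by_cases h0 : i < 1
        · have : i = 0 := by omega
          subst this
          rw [if_pos h0, if_pos h0]
          unfold pvCellAt
          rw [if_pos (by omega : c < (rows.getD 0 []).length)]
        · rw [if_neg h0, if_neg h0]
      have hinv := pvRowLoopA_inv (l0 :: restL) w hlen restL 1 (le_refl 1) (by simp)
      rw [← hn, ← hrows] at hinv
      calc pvRowLoopA n (l0 :: restL) 0 []
          = pvRowLoopA n restL 1 (pvColLoopA 0 n (PySem.Str.split₀ (PySem.Str.replace l0 "\n" "")) 0 []) := rfl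
        _ = pvRowLoopA n restL 1 (pvMpart rows n w 1) := by rw [step0]
        _ = pvMpart rows n w n := hinv
    rw [part1_cons, part1_alt_cons, ← hrows, ← hn, ← hw, hmp]
    unfold pvMpart
    rw [List.foldl_map]
    apply PySem.List.foldl_congr_mem
    intro acc c hcmem
    simp only [List.mem_range] at hcmem
    have hcol_simp : (List.range n).map (fun i => if i < n then pvCellAt rows c i else PCell.i 0)
        = (List.range n).map (fun i => pvCellAt rows c i) := by
      apply List.map_congr_left
      intro i hi
      simp only [List.mem_range] at hi
      rw [if_pos hi]
    rw [hcol_simp]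
    have hpe : ((n : Int) - 1) = (((n - 1 : Nat)) : Int) := by omega
    have hlast : rows.getD (n - 1) [] = rows.getLastD [] := by
      rw [hnlen] at *
      rw [← pv_getD_last rows []]
    have hget : PySem.List.pyGetD ((List.range n).map (fun i => pvCellAt rows c i)) ((n : Int) - 1) (PCell.i 0)
        = pvCellAt rows c (n - 1) := by
      rw [hpe, PySem.List.pyGetD_natCast]
      have hn2 : n - 1 < ((List.range n).map (fun i => pvCellAt rows c i)).length := by simp; omega
      rw [List.getD_eq_getElem?_getD, List.getElem?_eq_getElem hn2]
      simp
    have hpop : ((PySem.List.pop? ((List.range n).map (fun i => pvCellAt rows c i)) ((n : Int) - 1)).map Prod.snd).getD []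
        = (List.range (n-1)).map (fun i => pvCellAt rows c i) := by
      rw [hpe, pv_pop_snd _ (n-1) (by simp; omega), pv_dropLast_map_range]
    have hnums : ((rows.getLastD []).getD c "" = "+" ∨ (rows.getLastD []).getD c "" = "*") →
        ((List.range (n-1)).map (fun i => pvCellAt rows c i))
          = ((rows.dropLast).map (fun r => pvNumAt r c)).map PCell.i := by
      intro hop
      rw [pv_map_eq_map_range (rows.dropLast) _ [], List.map_map]
      have hdl : rows.dropLast.length = n - 1 := by rw [hnlen] at *; simp
      rw [hdl]
      apply List.map_congr_left
      intro i hi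
      simp only [List.mem_range] at hi
      have hgd : rows.dropLast.getD i [] = rows.getD i [] := by
        apply pv_getD_dropLast
        rw [hnlen] at *; omega
      simp only [Function.comp]
      rw [hgd]
      by_cases hcl : c < (rows.getD i []).length
      · have hmem : rows.getD i [] ∈ rows.dropLast := by
          rw [← hgd, List.getD_eq_getElem?_getD,
              List.getElem?_eq_getElem (by omega : i < rows.dropLast.length)]
          rw [Option.getD_some]
          exact List.getElem_mem _
        have hdigit := hdig c hcmem hop _ hmem hcl
        unfold pvCellAt pvCellOf pvNumAt
        rw [if_pos hcl, if_pos hdigit, if_pos ⟨hcl, hdigit⟩]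
      · unfold pvCellAt pvNumAt
        rw [if_neg hcl, if_neg (fun hx => hcl hx.1)]
    have hiff_p : (pvCellAt rows c (n-1) = PCell.s "+") ↔
        (c < (rows.getLastD []).length ∧ (rows.getLastD []).getD c "" = "+") := by
      rw [← hlast]; exact pv_cellAt_eq_s_iff rows c (n-1) "+" (by decide)
    have hiff_s : (pvCellAt rows c (n-1) = PCell.s "*") ↔
        (c < (rows.getLastD []).length ∧ (rows.getLastD []).getD c "" = "*") := by
      rw [← hlast]; exact pv_cellAt_eq_s_iff rows c (n-1) "*" (by decide)
    rw [hget, hpop]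
    by_cases hp : c < (rows.getLastD []).length ∧ (rows.getLastD []).getD c "" = "+"
    · rw [if_pos (hiff_p.mpr hp)]
      have hop? : (if c < (rows.getLastD []).length then some ((rows.getLastD []).getD c "") else none)
          = some "+" := by rw [if_pos hp.1, hp.2]
      rw [hnums (Or.inl hp.2), pvSumCells_map_i]
      simp only [hop?]
      simp
    · by_cases hs : c < (rows.getLastD []).length ∧ (rows.getLastD []).getD c "" = "*"
      · rw [if_neg (fun hx => hp (hiff_p.mp hx)), if_pos (hiff_s.mpr hs)]
        have hop? : (if c < (rows.getLastD []).length then some ((rows.getLastD []).getD c "") else none)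
            = some "*" := by rw [if_pos hs.1, hs.2]
        rw [hnums (Or.inr hs.2), pvProdCells_map_i]
        simp only [hop?]
        simp
      · rw [if_neg (fun hx => hp (hiff_p.mp hx)), if_neg (fun hx => hs (hiff_s.mp hx))]
        have hop? : ((if c < (rows.getLastD []).length then some ((rows.getLastD []).getD c "") else none) ≠ some "+")
            ∧ ((if c < (rows.getLastD []).length then some ((rows.getLastD []).getD c "") else none) ≠ some "*") := by
          constructor <;> intro hx <;> split_ifs at hx with hcl <;> simp at hx
          · exact hp ⟨hcl, hx⟩
          · exact hs ⟨hcl, hx⟩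
        simp only [if_pos hop?]

-- ===== VERDICT (by name: the statement is the Claim_ definition above) =====
theorem part1_spec : Claim_equal_part1 := by
  intro fileSA _ hpre
  unfold Spec_part1
  exact part1_eq fileSA hpre
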